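-- pv_equiv track=rewrite | github.com/rowan-adair/london-underground-dijkstra | main.py | lineConnections
-- ===== SOURCE A (Python) =====
-- def commonStations(line1, line2):
-- 	result = []
-- 	for station in line1:
-- 		for station_check in line2:
-- 			if station == station_check:
-- 				result.append(station)
-- 	return result
--
-- def lineConnections(train_line):
-- 	graph = {}
-- 	for a in train_line:
-- 		connected = {}
-- 		for b in train_line:
-- 			if a != b:
-- 				connected_stations = commonStations(train_line[a],train_line[b])
-- 				if len(connected_stations) > 0:
-- 					connected.update({b:connected_stations})
-- 		graph.update({a:connected})
-- 	return graph
-- ===== SOURCE B (Python) =====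
-- def lineConnections(train_line):
-- 	# Inverted index station -> {line: multiplicity}; each line's shared-station
-- 	# lists are then scattered from the index instead of scanning every other
-- 	# line station by station; emission re-walks train_line to keep A's key order.
-- 	idx = {}
-- 	for b in train_line:
-- 		for s in train_line[b]:
-- 			d = idx.setdefault(s, {})
-- 			d[b] = d.get(b, 0) + 1
-- 	graph = {}
-- 	for a in train_line:
-- 		acc = {}
-- 		for s in train_line[a]:
-- 			for b, k in idx[s].items():
-- 				if b != a:
-- 					acc.setdefault(b, []).extend([s] * k)
-- 		graph[a] = {b: acc[b] for b in train_line if b in acc}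
-- 	return graph
-- ===== Notes on version B (the rewrite author's own statement) =====
-- stated objective: faster
-- what changed: B builds an inverted index station -> {line: multiplicity} once and scatters each line's stations through it, so commonStations' per-pair station-by-station scan of the other line disappears; pairs sharing nothing cost only an emission membership test.
import Mathlib
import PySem

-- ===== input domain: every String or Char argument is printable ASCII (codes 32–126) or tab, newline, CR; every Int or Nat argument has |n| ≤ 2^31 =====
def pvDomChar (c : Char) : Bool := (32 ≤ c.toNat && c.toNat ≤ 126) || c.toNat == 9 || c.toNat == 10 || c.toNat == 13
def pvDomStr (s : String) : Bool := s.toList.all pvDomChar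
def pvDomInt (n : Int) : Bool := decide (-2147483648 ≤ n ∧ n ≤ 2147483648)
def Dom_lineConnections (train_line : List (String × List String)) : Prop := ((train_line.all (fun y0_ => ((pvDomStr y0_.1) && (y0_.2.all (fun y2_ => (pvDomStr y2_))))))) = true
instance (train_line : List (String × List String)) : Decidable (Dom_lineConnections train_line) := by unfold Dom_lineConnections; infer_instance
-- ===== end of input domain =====

-- B replaces A's per-pair station-by-station scans with an inverted index
-- station -> {line: multiplicity} built once (objective: faster).

-- ===== PORT A =====
-- literal port of commonStations: nested loops appending matching stations
def commonStations (line1 line2 : List String) : List String :=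
  line1.foldl (fun result station =>
    line2.foldl (fun r station_check =>
      if station = station_check then r ++ [station] else r) result) []

def lineConnections (train_line : List (String × List String)) : List (String × List (String × List String)) :=
  let d := PySem.Dict.ofList train_line
  (d.keys.foldl (fun (graph : PySem.Dict String (List (String × List String))) a =>
    let connected := d.keys.foldl (fun (connected : PySem.Dict String (List String)) b =>
      if a ≠ b then
        let connected_stations := commonStations (d.getD a []) (d.getD b [])
        if 0 < connected_stations.length then connected.insert b connected_stations
        else connected
      else connected) PySem.Dict.empty
    graph.insert a connected.items) PySem.Dict.empty).items

-- ===== PORT B =====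
def lineConnections_alt (train_line : List (String × List String)) : List (String × List (String × List String)) :=
  let d := PySem.Dict.ofList train_line
  -- idx.setdefault(s, {}) then d[b] = d.get(b, 0) + 1, as one functional update
  let idx := d.keys.foldl (fun (idx : PySem.Dict String (PySem.Dict String Int)) b =>
    (d.getD b []).foldl (fun idx s =>
      idx.modify s PySem.Dict.empty (fun m => m.modify b 0 (· + 1))) idx) PySem.Dict.empty
  (d.keys.foldl (fun (graph : PySem.Dict String (List (String × List String))) a =>
    -- acc.setdefault(b, []).extend([s] * k)
    let acc := (d.getD a []).foldl (fun (acc : PySem.Dict String (List String)) s =>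
      (idx.getD s PySem.Dict.empty).items.foldl (fun acc p =>
        if p.1 ≠ a then acc.modify p.1 [] (· ++ List.replicate p.2.toNat s) else acc) acc) PySem.Dict.empty
    -- {b: acc[b] for b in train_line if b in acc}
    let connected := d.keys.foldl (fun (c : PySem.Dict String (List String)) b =>
      if acc.contains b then c.insert b (acc.getD b []) else c) PySem.Dict.empty
    graph.insert a connected.items) PySem.Dict.empty).items

-- ===== PRECONDITION & SPEC =====
def Spec_lineConnections (train_line : List (String × List String)) (out : List (String × List (String × List String))) : Prop := out = lineConnections_alt train_line
instance (train_line : List (String × List String)) (out : List (String × List (String × List String))) : Decidable (Spec_lineConnections train_line out) := by unfold Spec_lineConnections; infer_instance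

-- ===== CLAIM (what is proved, stated in full; the proofs are below) =====
def Claim_equal_lineConnections : Prop := ∀ (train_line : List (String × List String)), Dom_lineConnections train_line → Spec_lineConnections train_line (lineConnections train_line)

-- ===== LEMMAS AND PROOFS =====

theorem line_fold_props (lb : List String) (b : String)
    (idx0 : PySem.Dict String (PySem.Dict String Int)) (s : String) :
    (((lb.foldl (fun idx s =>
      idx.modify s PySem.Dict.empty (fun m => m.modify b 0 (· + 1))) idx0).getD s PySem.Dict.empty).getD b 0
        = (idx0.getD s PySem.Dict.empty).getD b 0 + (lb.count s : Int))
    ∧ (((lb.foldl (fun idx s => idx.modify s PySem.Dict.empty (fun m => m.modify b 0 (· + 1))) idx0).getD s PySem.Dict.empty).contains b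
        = ((idx0.getD s PySem.Dict.empty).contains b || decide (s ∈ lb)))
    ∧ (∀ b', b' ≠ b →
        ((lb.foldl (fun idx s => idx.modify s PySem.Dict.empty (fun m => m.modify b 0 (· + 1))) idx0).getD s PySem.Dict.empty).getD b' 0 = (idx0.getD s PySem.Dict.empty).getD b' 0
        ∧ ((lb.foldl (fun idx s => idx.modify s PySem.Dict.empty (fun m => m.modify b 0 (· + 1))) idx0).getD s PySem.Dict.empty).contains b' = (idx0.getD s PySem.Dict.empty).contains b')
    ∧ ((idx0.getD s PySem.Dict.empty).keys.Nodup → ((lb.foldl (fun idx s => idx.modify s PySem.Dict.empty (fun m => m.modify b 0 (· + 1))) idx0).getD s PySem.Dict.empty).keys.Nodup) := by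
  induction lb generalizing idx0 with
  | nil => simp
  | cons x lb ih =>
    simp only [List.foldl_cons]
    rcases ih (idx0.modify x PySem.Dict.empty (fun m => m.modify b 0 (· + 1))) with ⟨h1, h2, h3, h4⟩
    by_cases hsx : s = x
    · subst hsx
      rw [PySem.Dict.getD_modify_self] at h1 h2 h3 h4
      refine ⟨?_, ?_, ?_, ?_⟩
      · rw [h1, PySem.Dict.getD_modify_self, List.count_cons]
        simp; ring
      · rw [h2, PySem.Dict.contains_modify]
        simp
      · intro b' hb'
        rcases h3 b' hb' with ⟨g1, g2⟩
        refine ⟨?_, ?_⟩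
        · rw [g1, PySem.Dict.getD_modify_of_ne _ _ _ hb']
        · rw [g2, PySem.Dict.contains_modify]; simp [hb']
      · intro hnd
        apply h4
        rw [PySem.Dict.keys_modify]
        exact PySem.Dict.nodup_keys_insert _ _ _ hnd
    · rw [PySem.Dict.getD_modify_of_ne _ _ _ hsx] at h1 h2 h3 h4
      refine ⟨?_, ?_, h3, h4⟩
      · rw [h1, List.count_cons]; simp [Ne.symm hsx]
      · rw [h2]; simp [hsx]

theorem idx_fold_untouched (rs : List String) (g : String → List String)
    (idx0 : PySem.Dict String (PySem.Dict String Int)) (b : String) (hb : b ∉ rs) (s : String) :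
    (((rs.foldl (fun idx b => (g b).foldl (fun idx s =>
        idx.modify s PySem.Dict.empty (fun m => m.modify b 0 (· + 1))) idx) idx0)).getD s PySem.Dict.empty).getD b 0
      = (idx0.getD s PySem.Dict.empty).getD b 0
    ∧ (((rs.foldl (fun idx b => (g b).foldl (fun idx s =>
        idx.modify s PySem.Dict.empty (fun m => m.modify b 0 (· + 1))) idx) idx0)).getD s PySem.Dict.empty).contains b
      = (idx0.getD s PySem.Dict.empty).contains b := by
  induction rs generalizing idx0 with
  | nil => exact ⟨rfl, rfl⟩
  | cons c rs ih =>
    simp only [List.mem_cons, not_or] at hb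
    simp only [List.foldl_cons]
    rcases ih _ hb.2 with ⟨i1, i2⟩
    rcases (line_fold_props (g c) c idx0 s).2.2.1 b hb.1 with ⟨j1, j2⟩
    exact ⟨i1.trans j1, i2.trans j2⟩

theorem idx_fold_props (rs : List String) (g : String → List String)
    (idx0 : PySem.Dict String (PySem.Dict String Int)) (hnd : rs.Nodup)
    (hfresh : ∀ s b, b ∈ rs → (idx0.getD s PySem.Dict.empty).contains b = false)
    (hnodup0 : ∀ s, (idx0.getD s PySem.Dict.empty).keys.Nodup) :
    (∀ s b, b ∈ rs →
      (((rs.foldl (fun idx b => (g b).foldl (fun idx s =>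
          idx.modify s PySem.Dict.empty (fun m => m.modify b 0 (· + 1))) idx) idx0)).getD s PySem.Dict.empty).getD b 0 = ((g b).count s : Int)
      ∧ (((rs.foldl (fun idx b => (g b).foldl (fun idx s =>
          idx.modify s PySem.Dict.empty (fun m => m.modify b 0 (· + 1))) idx) idx0)).getD s PySem.Dict.empty).contains b = decide (s ∈ g b))
    ∧ (∀ s, (((rs.foldl (fun idx b => (g b).foldl (fun idx s =>
          idx.modify s PySem.Dict.empty (fun m => m.modify b 0 (· + 1))) idx) idx0)).getD s PySem.Dict.empty).keys.Nodup) := by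
  induction rs generalizing idx0 with
  | nil => exact ⟨fun s b hb => absurd hb (List.not_mem_nil), hnodup0⟩
  | cons c rs ih =>
    simp only [List.foldl_cons]
    have hc : ∀ s, ((( g c).foldl (fun idx s => idx.modify s PySem.Dict.empty (fun m => m.modify c 0 (· + 1))) idx0).getD s PySem.Dict.empty).getD c 0 = ((g c).count s : Int) := by
      intro s
      have h := (line_fold_props (g c) c idx0 s).1
      rw [h, PySem.Dict.getD_of_not_contains _ _ (hfresh s c (List.mem_cons_self))]
      simp
    have hcc : ∀ s, ((( g c).foldl (fun idx s => idx.modify s PySem.Dict.empty (fun m => m.modify c 0 (· + 1))) idx0).getD s PySem.Dict.empty).contains c = decide (s ∈ g c) := by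
      intro s
      have h := (line_fold_props (g c) c idx0 s).2.1
      rw [h, hfresh s c (List.mem_cons_self)]
      simp
    rcases List.nodup_cons.1 hnd with ⟨hcrs, hnd'⟩
    have hfresh' : ∀ s b, b ∈ rs → (((g c).foldl (fun idx s => idx.modify s PySem.Dict.empty (fun m => m.modify c 0 (· + 1))) idx0).getD s PySem.Dict.empty).contains b = false := by
      intro s b hb
      have hbc : b ≠ c := fun h => hcrs (h ▸ hb)
      rw [((line_fold_props (g c) c idx0 s).2.2.1 b hbc).2]
      exact hfresh s b (List.mem_cons_of_mem _ hb)
    have hnodup' : ∀ s, (((g c).foldl (fun idx s => idx.modify s PySem.Dict.empty (fun m => m.modify c 0 (· + 1))) idx0).getD s PySem.Dict.empty).keys.Nodup := by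
      intro s
      exact (line_fold_props (g c) c idx0 s).2.2.2 (hnodup0 s)
    rcases ih _ hnd' hfresh' hnodup' with ⟨H1, H2⟩
    refine ⟨?_, H2⟩
    intro s b hb
    rcases List.mem_cons.1 hb with hbc | hbr
    · subst hbc
      rcases idx_fold_untouched rs g _ b hcrs s with ⟨u1, u2⟩
      exact ⟨u1.trans (hc s), u2.trans (hcc s)⟩
    · exact H1 s b hbr

theorem scatter_getD (its : List (String × Int)) (a b s : String) (hba : b ≠ a)
    (acc : PySem.Dict String (List String)) :
    (its.foldl (fun acc p =>
        if p.1 ≠ a then acc.modify p.1 [] (· ++ List.replicate p.2.toNat s) else acc) acc).getD b []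
      = its.foldl (fun l p => if p.1 = b then l ++ List.replicate p.2.toNat s else l) (acc.getD b []) := by
  induction its generalizing acc with
  | nil => rfl
  | cons p its ih =>
    simp only [List.foldl_cons]
    by_cases hpb : p.1 = b
    · rw [if_pos hpb, if_pos (hpb ▸ hba), ih]
      rw [hpb, PySem.Dict.getD_modify_self]
    · rw [if_neg hpb]
      by_cases hpa : p.1 = a
      · rw [if_neg (fun h => h hpa)]
        exact ih acc
      · rw [if_pos hpa, ih, PySem.Dict.getD_modify_of_ne _ _ _ (fun h => hpb h.symm)]

theorem scatter_contains (its : List (String × Int)) (a b s : String) (hba : b ≠ a)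
    (acc : PySem.Dict String (List String)) :
    (its.foldl (fun acc p =>
        if p.1 ≠ a then acc.modify p.1 [] (· ++ List.replicate p.2.toNat s) else acc) acc).contains b
      = (acc.contains b || its.any (fun p => p.1 == b)) := by
  induction its generalizing acc with
  | nil => simp
  | cons p its ih =>
    simp only [List.foldl_cons, List.any_cons]
    by_cases hpa : p.1 = a
    · rw [if_neg (fun h => h hpa)]
      rw [ih, show (p.1 == b) = false by rw [hpa]; exact beq_eq_false_iff_ne.2 (Ne.symm hba)]
      simp
    · rw [if_pos hpa, ih, PySem.Dict.contains_modify]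
      by_cases hpb : p.1 = b
      · simp [hpb]
      · rw [show (b == p.1) = false from beq_eq_false_iff_ne.2 (fun h => hpb h.symm),
            show (p.1 == b) = false from beq_eq_false_iff_ne.2 hpb]
        simp

theorem scatter_contains_self (its : List (String × Int)) (a s : String)
    (acc : PySem.Dict String (List String)) :
    (its.foldl (fun acc p =>
        if p.1 ≠ a then acc.modify p.1 [] (· ++ List.replicate p.2.toNat s) else acc) acc).contains a
      = acc.contains a := by
  induction its generalizing acc with
  | nil => rfl
  | cons p its ih =>
    simp only [List.foldl_cons]
    by_cases hpa : p.1 = a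
    · rw [if_neg (fun h => h hpa), ih]
    · rw [if_pos hpa, ih, PySem.Dict.contains_modify,
          show (a == p.1) = false from beq_eq_false_iff_ne.2 (fun h => hpa h.symm)]
      simp

theorem fold_over_nodup_keys (ks : List String) (hnd : ks.Nodup) (g : String → Int)
    (b s : String) (L : List String) :
    (ks.map (fun k => (k, g k))).foldl (fun l p => if p.1 = b then l ++ List.replicate p.2.toNat s else l) L
      = if b ∈ ks then L ++ List.replicate (g b).toNat s else L := by
  induction ks generalizing L with
  | nil => simp
  | cons k ks ih =>
    rcases List.nodup_cons.1 hnd with ⟨hk, hnd'⟩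
    simp only [List.map_cons, List.foldl_cons]
    by_cases hkb : k = b
    · subst hkb
      rw [if_pos rfl, ih hnd', if_neg hk, if_pos (List.mem_cons_self)]
    · rw [if_neg hkb, ih hnd']
      by_cases hbk : b ∈ ks
      · rw [if_pos hbk, if_pos (List.mem_cons_of_mem _ hbk)]
      · rw [if_neg hbk, if_neg (by simp [hbk]; exact fun h => hkb h.symm)]

theorem commonStations_inner (station : String) (l2 : List String) (r : List String) :
    l2.foldl (fun r sc => if station = sc then r ++ [station] else r) r
      = r ++ List.replicate (l2.count station) station := by
  induction l2 generalizing r with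
  | nil => simp
  | cons x l2 ih =>
    by_cases h : station = x
    · subst h
      simp only [List.foldl_cons, ih, List.count_cons, beq_self_eq_true, if_true]
      rw [List.append_assoc]
      simp
      rw [← List.replicate_succ, List.replicate_succ']
    · simp [List.foldl_cons, if_neg h, ih, Ne.symm h]

theorem acc_contains_self (la : List String) (idx : PySem.Dict String (PySem.Dict String Int))
    (a : String) (acc0 : PySem.Dict String (List String)) (h0 : acc0.contains a = false) :
    (la.foldl (fun acc s => (idx.getD s PySem.Dict.empty).items.foldl (fun acc p =>
        if p.1 ≠ a then acc.modify p.1 [] (· ++ List.replicate p.2.toNat s) else acc) acc) acc0).contains a = false := by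
  induction la generalizing acc0 with
  | nil => exact h0
  | cons s la ih =>
    simp only [List.foldl_cons]
    exact ih _ ((scatter_contains_self _ _ _ _).trans h0)

theorem acc_props (idx : PySem.Dict String (PySem.Dict String Int)) (la lb : List String)
    (a b : String) (hba : b ≠ a)
    (hkn : ∀ s, (idx.getD s PySem.Dict.empty).keys.Nodup)
    (hcount : ∀ s, (idx.getD s PySem.Dict.empty).getD b 0 = (lb.count s : Int))
    (hmem : ∀ s, (idx.getD s PySem.Dict.empty).contains b = decide (s ∈ lb))
    (acc0 : PySem.Dict String (List String)) :
    ((la.foldl (fun acc s => (idx.getD s PySem.Dict.empty).items.foldl (fun acc p =>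
        if p.1 ≠ a then acc.modify p.1 [] (· ++ List.replicate p.2.toNat s) else acc) acc) acc0).getD b []
      = acc0.getD b [] ++ la.flatMap (fun s => List.replicate (lb.count s) s))
    ∧ ((la.foldl (fun acc s => (idx.getD s PySem.Dict.empty).items.foldl (fun acc p =>
        if p.1 ≠ a then acc.modify p.1 [] (· ++ List.replicate p.2.toNat s) else acc) acc) acc0).contains b
      = (acc0.contains b || la.any (fun s => decide (s ∈ lb)))) := by
  induction la generalizing acc0 with
  | nil => simp
  | cons s la ih =>
    simp only [List.foldl_cons, List.flatMap_cons, List.any_cons]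
    have hitems : (idx.getD s PySem.Dict.empty).items
        = (idx.getD s PySem.Dict.empty).keys.map (fun k => (k, (idx.getD s PySem.Dict.empty).getD k 0)) :=
      PySem.Dict.items_eq_map_keys _ (hkn s) 0
    have h1 : ((idx.getD s PySem.Dict.empty).items.foldl (fun acc p =>
        if p.1 ≠ a then acc.modify p.1 [] (· ++ List.replicate p.2.toNat s) else acc) acc0).getD b []
        = acc0.getD b [] ++ List.replicate (lb.count s) s := by
      rw [scatter_getD _ a b s hba, hitems,
          fold_over_nodup_keys _ (hkn s) _ b s]
      by_cases hs : s ∈ lb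
      · rw [if_pos ((PySem.Dict.contains_iff_mem_keys _ _).1 ((hmem s).trans (by simp [hs])))]
        rw [hcount s]
        simp
      · rw [if_neg (fun hmem' => by
          have := (PySem.Dict.contains_iff_mem_keys (idx.getD s PySem.Dict.empty) b).2 hmem'
          rw [hmem s] at this; simp [hs] at this)]
        rw [List.count_eq_zero.2 hs]
        simp
    have h2 : ((idx.getD s PySem.Dict.empty).items.foldl (fun acc p =>
        if p.1 ≠ a then acc.modify p.1 [] (· ++ List.replicate p.2.toNat s) else acc) acc0).contains b
        = (acc0.contains b || decide (s ∈ lb)) := by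
      rw [scatter_contains _ a b s hba, hitems]
      congr 1
      rw [List.any_map]
      rw [← hmem s, PySem.Dict.contains_eq_decide_mem_keys]
      simp [Function.comp_def, List.any_beq']
    rcases ih _ with ⟨i1, i2⟩
    constructor
    · rw [i1, h1, List.append_assoc]
    · rw [i2, h2, Bool.or_assoc]

theorem commonStations_eq (l1 l2 : List String) :
    commonStations l1 l2 = l1.flatMap (fun s => List.replicate (l2.count s) s) := by
  unfold commonStations
  simp only [commonStations_inner]
  rw [PySem.List.foldl_append_eq_flatMap]
  simp

theorem main_core (d : PySem.Dict String (List String)) (hnd : d.keys.Nodup) :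
    (d.keys.foldl (fun (graph : PySem.Dict String (List (String × List String))) a =>
      let connected := d.keys.foldl (fun (connected : PySem.Dict String (List String)) b =>
        if a ≠ b then
          let connected_stations := commonStations (d.getD a []) (d.getD b [])
          if 0 < connected_stations.length then connected.insert b connected_stations
          else connected
        else connected) PySem.Dict.empty
      graph.insert a connected.items) PySem.Dict.empty).items
    = ((d.keys.foldl (fun (graph : PySem.Dict String (List (String × List String))) a =>
        let acc := (d.getD a []).foldl (fun (acc : PySem.Dict String (List String)) s =>
          (((d.keys.foldl (fun (idx : PySem.Dict String (PySem.Dict String Int)) b =>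
            (d.getD b []).foldl (fun idx s =>
              idx.modify s PySem.Dict.empty (fun m => m.modify b 0 (· + 1))) idx) PySem.Dict.empty).getD s PySem.Dict.empty).items).foldl (fun acc p =>
            if p.1 ≠ a then acc.modify p.1 [] (· ++ List.replicate p.2.toNat s) else acc) acc) PySem.Dict.empty
        let connected := d.keys.foldl (fun (c : PySem.Dict String (List String)) b =>
          if acc.contains b then c.insert b (acc.getD b []) else c) PySem.Dict.empty
        graph.insert a connected.items) PySem.Dict.empty).items) := by
  rcases idx_fold_props d.keys (fun b => d.getD b []) PySem.Dict.empty hnd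
      (by intro s b _; rw [PySem.Dict.getD_empty]; exact PySem.Dict.contains_empty b)
      (by intro s; rw [PySem.Dict.getD_empty]; exact PySem.Dict.nodup_keys_empty) with ⟨HI, HN⟩
  set idxv := d.keys.foldl (fun (idx : PySem.Dict String (PySem.Dict String Int)) b =>
    (d.getD b []).foldl (fun idx s =>
      idx.modify s PySem.Dict.empty (fun m => m.modify b 0 (· + 1))) idx) PySem.Dict.empty with hidx
  apply congrArg PySem.Dict.items
  apply PySem.List.foldl_congr_mem
  intro graph a _
  apply congrArg (fun c : PySem.Dict String (List String) => graph.insert a c.items)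
  apply PySem.List.foldl_congr_mem
  intro c b hb
  by_cases hab : a = b
  · -- b = a: A skips via a != b; B's acc never contains a
    subst hab
    have hca := acc_contains_self (d.getD a []) idxv a PySem.Dict.empty (PySem.Dict.contains_empty a)
    rw [if_neg (fun h => h rfl)]
    simp only [hca, Bool.false_eq_true, if_false]
  · have hba : b ≠ a := fun h => hab h.symm
    rcases acc_props idxv (d.getD a []) (d.getD b []) a b hba HN
        (fun s => (HI s b hb).1) (fun s => (HI s b hb).2) PySem.Dict.empty with ⟨A1, A2⟩
    rw [PySem.Dict.getD_empty] at A1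
    rw [PySem.Dict.contains_empty] at A2
    simp only [List.nil_append] at A1
    simp only [Bool.false_or] at A2
    rw [if_pos hab, commonStations_eq]
    by_cases hx : (d.getD a []).any (fun s => decide (s ∈ d.getD b [])) = true
    · have hpos : 0 < ((d.getD a []).flatMap (fun s => List.replicate ((d.getD b []).count s) s)).length := by
        rcases List.any_eq_true.1 hx with ⟨s, hs, hsl⟩
        simp only [decide_eq_true_eq] at hsl
        have hm : s ∈ (d.getD a []).flatMap (fun s => List.replicate ((d.getD b []).count s) s) :=
          List.mem_flatMap.2 ⟨s, hs, by
            simp only [List.mem_replicate]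
            exact ⟨Nat.pos_iff_ne_zero.1 (List.count_pos_iff.2 hsl), trivial⟩⟩
        exact List.length_pos_of_mem hm
      rw [if_pos hpos]
      simp only [A2, hx, if_true, A1]
    · have hnp : ¬ 0 < ((d.getD a []).flatMap (fun s => List.replicate ((d.getD b []).count s) s)).length := by
        intro hlen
        rcases List.exists_mem_of_length_pos hlen with ⟨x, hxmem⟩
        rcases List.mem_flatMap.1 hxmem with ⟨st, hs, hrep⟩
        have hcpos : 0 < (d.getD b []).count st := by
          by_contra h0
          simp [Nat.eq_zero_of_not_pos h0] at hrep
        exact hx (List.any_eq_true.2 ⟨st, hs, by simp [List.count_pos_iff.1 hcpos]⟩)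
      rw [if_neg hnp]
      rw [Bool.not_eq_true] at hx
      simp only [A2, hx, Bool.false_eq_true, if_false]

-- ===== VERDICT =====
theorem lineConnections_spec : Claim_equal_lineConnections := by
  intro train_line _
  unfold Spec_lineConnections lineConnections lineConnections_alt
  exact main_core (PySem.Dict.ofList train_line) (PySem.Dict.nodup_keys_ofList train_line)
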